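-- pv_equiv track=rewrite | github.com/abominablem/tk-arrange | arrange_widgets.py | _count_sequence
-- ===== SOURCE A (Python) =====
-- def _count_sequence(lst, value, start = 0):
--     """
--     Count the number of sequential occurrences of a value in a list after
--     a defined point.
--     """
--     lst = lst[start:]
--     try:
--         lst = lst[lst.index(value):]
--         i = 0
--         while i < len(lst) and lst[i] == value:
--             i += 1
--         return i
--     except ValueError:
--         return 0
-- ===== SOURCE B (Python) =====
-- def _count_sequence(lst, value, start = 0):
--     # Build a run-length encoding of lst[start:] (one pass), then return the
--     # length of the first run whose value matches, or 0 if none does.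
--     runs = []
--     cur = None  # current open run as (val, count)
--     for x in lst[start:]:
--         if cur is None:
--             cur = (x, 1)
--         elif cur[0] == x:
--             cur = (cur[0], cur[1] + 1)
--         else:
--             runs.append(cur)
--             cur = (x, 1)
--     if cur is not None:
--         runs.append(cur)
--     for v, c in runs:
--         if v == value:
--             return c
--     return 0
-- ===== Notes on version B (the rewrite author's own statement) =====
-- stated objective: alternative
-- what changed: Instead of locating the first occurrence with .index and counting it with a while loop inside try/except, B builds a run-length encoding of lst[start:] (list of (value, count) runs) in one pass and then returns the count of the first run whose value matches, 0 if none.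
import Mathlib
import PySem

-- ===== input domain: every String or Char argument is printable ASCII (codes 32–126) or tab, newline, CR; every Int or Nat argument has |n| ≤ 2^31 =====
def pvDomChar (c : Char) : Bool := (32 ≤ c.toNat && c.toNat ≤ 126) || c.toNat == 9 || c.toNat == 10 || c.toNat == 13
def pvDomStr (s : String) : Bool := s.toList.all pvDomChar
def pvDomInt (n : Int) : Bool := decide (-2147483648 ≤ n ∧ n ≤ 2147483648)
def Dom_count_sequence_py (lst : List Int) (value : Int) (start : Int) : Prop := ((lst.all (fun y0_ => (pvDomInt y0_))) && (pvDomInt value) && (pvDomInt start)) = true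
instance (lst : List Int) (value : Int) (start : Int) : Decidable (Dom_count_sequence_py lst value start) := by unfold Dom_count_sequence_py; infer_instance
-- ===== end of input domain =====

-- B replaces A's find-with-.index-then-count-while (inside try/except) by building a
-- run-length encoding of lst[start:] and looking up the first matching run; same O(n)
-- cost, a different (RLE) intermediate structure. Return values only (no mutation).

-- ===== PORT A =====
-- the `while i < len(lst) and lst[i] == value: i += 1` loop over the suffix starting at the
-- found index: counts leading elements equal to value
def pyCountWhile (l : List Int) (value : Int) : Int :=
  match l with
  | [] => 0
  | x :: xs => if x = value then 1 + pyCountWhile xs value else 0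

def count_sequence_py (lst : List Int) (value : Int) (start : Int) : Int :=
  let l := PySem.List.slice lst (some start) none   -- lst = lst[start:]
  match PySem.List.index? l value with              -- lst.index(value); none = ValueError → except: return 0
  | none => 0
  | some i => pyCountWhile (l.drop i) value         -- lst = lst[i:] with 0 ≤ i < len, i.e. drop i; then the while loop

-- ===== PORT B =====
-- one step of the RLE-building loop; state = (closed runs, current open run)
def stepRun (st : List (Int × Int) × Option (Int × Int)) (x : Int) :
    List (Int × Int) × Option (Int × Int) :=
  match st.2 with
  | none => (st.1, some (x, 1))
  | some (y, c) => if y = x then (st.1, some (y, c + 1)) else (st.1 ++ [(y, c)], some (x, 1))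

-- `if cur is not None: runs.append(cur)`
def finalizeRuns (st : List (Int × Int) × Option (Int × Int)) : List (Int × Int) :=
  match st.2 with
  | none => st.1
  | some p => st.1 ++ [p]

-- `for v, c in runs: if v == value: return c` / `return 0`
def firstRun (rs : List (Int × Int)) (value : Int) : Int :=
  match rs with
  | [] => 0
  | (y, c) :: rest => if y = value then c else firstRun rest value

def count_sequence_py_alt (lst : List Int) (value : Int) (start : Int) : Int :=
  firstRun (finalizeRuns ((PySem.List.slice lst (some start) none).foldl stepRun ([], none))) value

-- ===== PRECONDITION & SPEC =====
def Spec_count_sequence_py (lst : List Int) (value : Int) (start : Int) (out : Int) : Prop := out = count_sequence_py_alt lst value start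
instance (lst : List Int) (value : Int) (start : Int) (out : Int) : Decidable (Spec_count_sequence_py lst value start out) := by unfold Spec_count_sequence_py; infer_instance

-- ===== CLAIM (what is proved, stated in full; the proofs are below) =====
def Claim_equal_count_sequence_py : Prop := ∀ (lst : List Int) (value : Int) (start : Int), Dom_count_sequence_py lst value start → Spec_count_sequence_py lst value start (count_sequence_py lst value start)

-- ===== LEMMAS AND PROOFS =====

-- A's core (after slicing), as a named function for the proofs
def coreA (l : List Int) (v : Int) : Int :=
  match PySem.List.index? l v with
  | none => 0
  | some i => pyCountWhile (l.drop i) v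

theorem coreA_cons_self (xs : List Int) (v : Int) :
    coreA (v :: xs) v = 1 + pyCountWhile xs v := by
  unfold coreA
  rw [PySem.List.index?_cons_self]
  simp [pyCountWhile]

theorem coreA_cons_ne (x : Int) (xs : List Int) (v : Int) (h : x ≠ v) :
    coreA (x :: xs) v = coreA xs v := by
  unfold coreA
  rw [PySem.List.index?_cons_of_ne xs h]
  cases PySem.List.index? xs v with
  | none => rfl
  | some i => simp

def hasRunB (rs : List (Int × Int)) (v : Int) : Bool :=
  rs.any (fun p => p.1 == v)

theorem hasRunB_cons (y c v : Int) (rest : List (Int × Int)) :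
    hasRunB ((y, c) :: rest) v = ((y == v) || hasRunB rest v) := rfl

theorem firstRun_append_of_has (rs ts : List (Int × Int)) (v : Int)
    (h : hasRunB rs v = true) : firstRun (rs ++ ts) v = firstRun rs v := by
  induction rs with
  | nil => exact absurd h (by simp [hasRunB])
  | cons p rest ih =>
    obtain ⟨y, c⟩ := p
    by_cases hy : y = v
    · simp [firstRun, hy]
    · rw [hasRunB_cons] at h
      have h' : hasRunB rest v = true := by
        rcases Bool.or_eq_true_iff.mp h with hh | hh
        · exact absurd (by simpa using hh) hy
        · exact hh
      simp [firstRun, hy, ih h']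

theorem firstRun_append_of_not (rs ts : List (Int × Int)) (v : Int)
    (h : hasRunB rs v = false) : firstRun (rs ++ ts) v = firstRun ts v := by
  induction rs with
  | nil => simp
  | cons p rest ih =>
    obtain ⟨y, c⟩ := p
    rw [hasRunB_cons] at h
    simp only [Bool.or_eq_false_iff, beq_eq_false_iff_ne, ne_eq] at h
    simp [firstRun, h.1, ih h.2]

theorem hasRunB_append_single (rs : List (Int × Int)) (y c v : Int) :
    hasRunB (rs ++ [(y, c)]) v = (hasRunB rs v || (y == v)) := by
  simp [hasRunB, List.any_append]

-- L1: once a matching run is closed, the rest of the fold cannot change the answer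
theorem fold_of_has (v : Int) (l : List Int) :
    ∀ (rs : List (Int × Int)) (cur : Option (Int × Int)), hasRunB rs v = true →
      firstRun (finalizeRuns (l.foldl stepRun (rs, cur))) v = firstRun rs v := by
  induction l with
  | nil =>
    intro rs cur h
    cases cur with
    | none => simp [finalizeRuns]
    | some p => simp [finalizeRuns, firstRun_append_of_has _ _ _ h]
  | cons x xs ih =>
    intro rs cur h
    cases cur with
    | none => simpa [List.foldl, stepRun] using ih rs (some (x, 1)) h
    | some p =>
      obtain ⟨y, c⟩ := p
      simp only [List.foldl, stepRun]
      by_cases hy : y = x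
      · rw [if_pos hy]
        exact ih rs (some (y, c + 1)) h
      · rw [if_neg hy]
        have h' : hasRunB (rs ++ [(y, c)]) v = true := by
          rw [hasRunB_append_single, h, Bool.true_or]
        rw [ih (rs ++ [(y, c)]) (some (x, 1)) h']
        exact firstRun_append_of_has _ _ _ h

-- L2: open run already matches v, no earlier match: answer = c + leading count
theorem fold_open_self (v : Int) (l : List Int) :
    ∀ (rs : List (Int × Int)) (c : Int), hasRunB rs v = false →
      firstRun (finalizeRuns (l.foldl stepRun (rs, some (v, c)))) v
        = c + pyCountWhile l v := by
  induction l with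
  | nil =>
    intro rs c h
    simp [finalizeRuns, pyCountWhile, firstRun_append_of_not _ _ _ h, firstRun]
  | cons x xs ih =>
    intro rs c h
    simp only [List.foldl, stepRun]
    by_cases hx : v = x
    · rw [if_pos hx]
      rw [ih rs (c + 1) h]
      simp [pyCountWhile, hx.symm, add_assoc]
    · rw [if_neg hx]
      have h' : hasRunB (rs ++ [(v, c)]) v = true := by
        rw [hasRunB_append_single]
        simp
      rw [fold_of_has v xs (rs ++ [(v, c)]) (some (x, 1)) h',
          firstRun_append_of_not _ _ _ h]
      have hx' : ¬ x = v := fun hh => hx hh.symm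
      simp [firstRun, pyCountWhile, hx']

-- L3: open run does not match, no earlier match: answer = A's core on the rest
theorem fold_open_ne (v : Int) (l : List Int) :
    ∀ (rs : List (Int × Int)) (y c : Int), hasRunB rs v = false → y ≠ v →
      firstRun (finalizeRuns (l.foldl stepRun (rs, some (y, c)))) v = coreA l v := by
  induction l with
  | nil =>
    intro rs y c h hy
    simp [finalizeRuns, coreA, PySem.List.index?, firstRun_append_of_not _ _ _ h, firstRun, hy]
  | cons x xs ih =>
    intro rs y c h hy
    simp only [List.foldl, stepRun]
    by_cases hx : y = x
    · rw [if_pos hx]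
      rw [ih rs y (c + 1) h hy, ← hx, coreA_cons_ne y xs v hy]
    · rw [if_neg hx]
      have h' : hasRunB (rs ++ [(y, c)]) v = false := by
        rw [hasRunB_append_single, h, Bool.false_or]
        simpa using hy
      by_cases hxv : x = v
      · rw [hxv, fold_open_self v xs (rs ++ [(y, c)]) 1 h', ← hxv, hxv, coreA_cons_self]
      · rw [ih (rs ++ [(y, c)]) x 1 h' hxv, coreA_cons_ne x xs v hxv]

theorem core_eq_fold (l : List Int) (v : Int) :
    coreA l v = firstRun (finalizeRuns (l.foldl stepRun ([], none))) v := by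
  cases l with
  | nil => simp [coreA, PySem.List.index?, finalizeRuns, firstRun]
  | cons x xs =>
    simp only [List.foldl, stepRun]
    by_cases hx : x = v
    · rw [hx, fold_open_self v xs [] 1 (by simp [hasRunB]), coreA_cons_self]
    · rw [fold_open_ne v xs [] x 1 (by simp [hasRunB]) hx, coreA_cons_ne x xs v hx]

-- ===== VERDICT (by name: the statement is the Claim_ definition above) =====
theorem count_sequence_py_spec : Claim_equal_count_sequence_py := by
  intro lst value start _
  unfold Spec_count_sequence_py count_sequence_py count_sequence_py_alt
  exact core_eq_fold _ _
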